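-- pv_equiv track=rewrite | github.com/ScottFeichter/Daily-Practice-25 | 15-Problem-Primitives-Loop-Conditional-Function/15_Problem_Primitives-Loop-Conditional-Function.py | incrementCount
-- ===== SOURCE A (Python) =====
-- def incrementCount(num):
--     if num > 5:
--         adder = 3
--         loops = num
--         while loops > 0:
--             num+= adder
--             adder+= 1
--             loops-= 1
--     return num
-- ===== SOURCE B (Python) =====
-- def incrementCount(num):
--     # Closed form for the arithmetic series the loop accumulates.
--     if num > 5:
--         return num + 3 * num + num * (num - 1) // 2
--     return num
-- ===== Notes on version B (the rewrite author's own statement) =====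
-- stated objective: faster
-- what changed: Replaces the O(num) while loop summing an increasing adder with a single closed-form arithmetic-series formula using integer division.
import Mathlib
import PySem

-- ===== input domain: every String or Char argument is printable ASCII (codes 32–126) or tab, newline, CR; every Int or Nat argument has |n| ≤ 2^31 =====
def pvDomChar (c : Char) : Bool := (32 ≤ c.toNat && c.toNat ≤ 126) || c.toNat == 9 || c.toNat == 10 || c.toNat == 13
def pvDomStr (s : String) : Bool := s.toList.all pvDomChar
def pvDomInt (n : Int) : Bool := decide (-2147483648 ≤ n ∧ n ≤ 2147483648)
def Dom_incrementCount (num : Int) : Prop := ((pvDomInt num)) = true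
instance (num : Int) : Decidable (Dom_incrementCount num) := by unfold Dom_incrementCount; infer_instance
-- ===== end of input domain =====

-- B replaces A's O(num) while loop by the closed-form series formula (objective: faster, asymptotic).

-- ===== PORT A =====
-- while loops > 0: num += adder; adder += 1; loops -= 1
def incrementCountLoop (num adder loops : Int) : Int :=
  if _h : loops > 0 then incrementCountLoop (num + adder) (adder + 1) (loops - 1)
  else num
termination_by loops.toNat
decreasing_by omega

def incrementCount (num : Int) : Int :=
  if num > 5 then incrementCountLoop num 3 num
  else num

-- ===== PORT B =====
def incrementCount_alt (num : Int) : Int :=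
  if num > 5 then num + 3 * num + PySem.Int.floordiv (num * (num - 1)) 2
  else num

-- ===== PRECONDITION & SPEC =====
def Spec_incrementCount (num : Int) (out : Int) : Prop := out = incrementCount_alt num
instance (num : Int) (out : Int) : Decidable (Spec_incrementCount num out) := by unfold Spec_incrementCount; infer_instance

-- ===== CLAIM (what is proved, stated in full; the proofs are below) =====
def Claim_equal_incrementCount : Prop := ∀ (num : Int), Dom_incrementCount num → Spec_incrementCount num (incrementCount num)

-- ===== LEMMAS AND PROOFS =====

-- Loop characterisation: n iterations starting at adder add n*adder + (0+1+…+(n-1)).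
theorem incrementCountLoop_eq (n : Nat) (num adder : Int) :
    incrementCountLoop num adder (n : Int) = num + n * adder + (n * (n - 1)) / 2 := by
  induction n generalizing num adder with
  | zero => unfold incrementCountLoop; norm_num
  | succ k ih =>
    unfold incrementCountLoop
    rw [dif_pos (by exact_mod_cast Nat.succ_pos k)]
    push_cast
    rw [show (k : Int) + 1 - 1 = (k : Int) by ring, ih]
    rw [show ((k : Int) + 1) * (k : Int) = (k : Int) * ((k : Int) - 1) + (k : Int) * 2 by ring,
        Int.add_mul_ediv_right _ _ (by norm_num : (2:Int) ≠ 0)]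
    ring

-- ===== VERDICT (by name: the statement is the Claim_ definition above) =====
theorem incrementCount_spec : Claim_equal_incrementCount := by
  intro num _
  unfold Spec_incrementCount incrementCount incrementCount_alt
  by_cases h : num > 5
  · rw [if_pos h, if_pos h]
    obtain ⟨n, hn⟩ : ∃ n : Nat, num = (n : Int) := ⟨num.toNat, by omega⟩
    subst hn
    rw [incrementCountLoop_eq, PySem.Int.floordiv_eq_ediv_of_pos (by norm_num)]
    ring
  · rw [if_neg h, if_neg h]
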